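-- pv_equiv track=rewrite | github.com/eolandro/IAENERO2026 | Tema3/Lima/A2/comesolo.py | tablero_a_texto
-- ===== SOURCE A (Python) =====
-- def tablero_a_texto(tablero):
--     simbolos = {0: "○", 1: "◉"}
--     idx = 0
--     filas = 5
--     lineas = []
--
--     for i in range(1, filas + 1):
--         linea = "  " * (filas - i)
--         for _ in range(i):
--             if idx < len(tablero):
--                 linea += simbolos.get(tablero[idx], " ") + "   "
--                 idx += 1
--         lineas.append(linea.rstrip())
--
--     return "\n".join(lineas)
-- ===== SOURCE B (Python) =====
-- def tablero_a_texto(tablero):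
--     simbolos = {0: "○", 1: "◉"}
--     lineas = []
--     for i in range(1, 6):
--         inicio = i * (i - 1) // 2
--         celdas = tablero[inicio:inicio + i]
--         linea = "  " * (5 - i) + "".join(simbolos.get(c, " ") + "   " for c in celdas)
--         lineas.append(linea.rstrip())
--     return "\n".join(lineas)
-- ===== Notes on version B (the rewrite author's own statement) =====
-- stated objective: simpler
-- what changed: Replaces A's running idx counter threaded through nested loops (with an in-range guard per cell) by arithmetic triangular offsets and slicing: each row is built independently as a slice tablero[i*(i-1)//2 : ...+i] joined into a string.
import Mathlib
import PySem

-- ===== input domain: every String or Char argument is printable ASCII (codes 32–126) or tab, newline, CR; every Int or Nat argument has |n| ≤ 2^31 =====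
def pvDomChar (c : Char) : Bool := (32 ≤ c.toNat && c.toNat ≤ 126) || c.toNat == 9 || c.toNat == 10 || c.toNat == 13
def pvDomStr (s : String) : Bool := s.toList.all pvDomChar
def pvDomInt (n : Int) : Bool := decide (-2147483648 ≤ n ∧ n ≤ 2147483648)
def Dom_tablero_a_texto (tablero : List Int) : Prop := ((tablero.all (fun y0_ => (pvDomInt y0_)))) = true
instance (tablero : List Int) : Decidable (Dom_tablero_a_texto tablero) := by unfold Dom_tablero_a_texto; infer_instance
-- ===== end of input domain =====

-- B replaces A's running idx counter and per-cell in-range guard by triangular slice offsets; objective: simpler.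

-- ===== PORT A =====
def tablero_a_texto (tablero : List Int) : String :=
  let simbolos : PySem.Dict Int String := (PySem.Dict.empty.insert 0 "○").insert 1 "◉"
  let filas : Int := 5
  let res := (PySem.List.pyRange 1 (filas + 1) 1).foldl
    (fun (st : Int × List String) i =>
      -- linea = "  " * (filas - i)  (string repetition, ported by hand via pyRepeat on the char list; exact)
      let linea0 : String := String.ofList (PySem.List.pyRepeat "  ".toList (filas - i))
      let inner := (PySem.List.pyRange 0 i 1).foldl
        (fun (p : Int × String) _ =>
          if p.1 < (tablero.length : Int) then
            -- tablero[idx]: the guard proves 0 ≤ idx < len, so pyGetD's default is never used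
            (p.1 + 1, p.2 ++ simbolos.getD (PySem.List.pyGetD tablero p.1 0) " " ++ "   ")
          else p)
        (st.1, linea0)
      (inner.1, st.2 ++ [PySem.Str.rstrip inner.2]))
    (0, [])
  PySem.Str.join "\n" res.2

-- ===== PORT B =====
def tablero_a_texto_alt (tablero : List Int) : String :=
  let simbolos : PySem.Dict Int String := (PySem.Dict.empty.insert 0 "○").insert 1 "◉"
  let lineas := (PySem.List.pyRange 1 6 1).map (fun i =>
    let inicio := PySem.Int.floordiv (i * (i - 1)) 2
    let celdas := PySem.List.slice tablero (some inicio) (some (inicio + i))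
    let linea := String.ofList (PySem.List.pyRepeat "  ".toList (5 - i)) ++
      PySem.Str.join "" (celdas.map (fun c => simbolos.getD c " " ++ "   "))
    PySem.Str.rstrip linea)
  PySem.Str.join "\n" lineas

-- ===== PRECONDITION & SPEC =====
def Spec_tablero_a_texto (tablero : List Int) (out : String) : Prop := out = tablero_a_texto_alt tablero
instance (tablero : List Int) (out : String) : Decidable (Spec_tablero_a_texto tablero out) := by unfold Spec_tablero_a_texto; infer_instance

-- ===== CLAIM (what is proved, stated in full; the proofs are below) =====
def Claim_equal_tablero_a_texto : Prop := ∀ (tablero : List Int), Dom_tablero_a_texto tablero → Spec_tablero_a_texto tablero (tablero_a_texto tablero)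

-- ===== LEMMAS AND PROOFS =====

-- the symbol dictionary shared by both ports
def pvSym : PySem.Dict Int String := (PySem.Dict.empty.insert 0 "○").insert 1 "◉"

-- one cell's contribution to a line
def pvCell (c : Int) : String := pvSym.getD c " " ++ "   "

-- B's row body: the joined cells of the slice starting at s, length i
def pvRow (t : List Int) (s i : Nat) : String :=
  PySem.Str.join "" (((t.drop s).take i).map pvCell)

theorem pv_intercalate_nil (l : List (List Char)) :
    List.intercalate ([] : List Char) l = l.flatten := by
  simp only [List.intercalate]
  induction l with
  | nil => simp
  | cons h t ih => cases t <;> simp_all [List.intersperse]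

theorem pv_join_empty_snoc (xs : List String) (x : String) :
    PySem.Str.join "" (xs ++ [x]) = PySem.Str.join "" xs ++ x := by
  simp [PySem.Str.join, PySem.Chars.join, pv_intercalate_nil]

theorem pvRow_succ_in (t : List Int) (s i : Nat) (h : s + i < t.length) :
    pvRow t s (i + 1) = pvRow t s i ++ pvCell (PySem.List.pyGetD t ((s : Int) + (i : Int)) 0) := by
  have hget : PySem.List.pyGetD t ((s : Int) + (i : Int)) 0 = t[s + i]'h := by
    rw [show ((s : Int) + (i : Int)) = ((s + i : Nat) : Int) by push_cast; ring,
      PySem.List.pyGetD_natCast]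
    exact List.getD_eq_getElem t 0 h
  have htake : (t.drop s).take (i + 1) = (t.drop s).take i ++ [t[s + i]'h] := by
    rw [List.take_add_one]
    congr 1
    have hi : i < (t.drop s).length := by simp; omega
    simp [List.getElem?_eq_getElem hi]
  rw [hget, pvRow, htake, List.map_append, List.map_cons, List.map_nil, pv_join_empty_snoc]
  rfl

theorem pvRow_succ_out (t : List Int) (s i : Nat) (h : t.length ≤ s + i) :
    pvRow t s (i + 1) = pvRow t s i := by
  unfold pvRow
  congr 2
  have h1 : (t.drop s).length ≤ i := by simp; omega
  rw [List.take_of_length_le h1, List.take_of_length_le (by omega)]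

-- A's inner loop over range(i): starting from a valid index s it appends the cells
-- t[s], …, and ends at min (s+i) len.
theorem pv_innerA (t : List Int) (i : Nat) : ∀ (s : Nat), s ≤ t.length → ∀ (lin : String),
    (PySem.List.pyRange 0 (i : Int) 1).foldl
      (fun (p : Int × String) _ =>
        if p.1 < (t.length : Int) then
          (p.1 + 1, p.2 ++ pvSym.getD (PySem.List.pyGetD t p.1 0) " " ++ "   ")
        else p)
      ((s : Int), lin)
    = (((min (s + i) t.length : Nat) : Int), lin ++ pvRow t s i) := by
  induction i with
  | zero =>
    intro s hs lin
    rw [PySem.List.pyRange_one_eq_nil (by norm_num)]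
    simp only [List.foldl_nil, Nat.add_zero, min_eq_left hs]
    have h0 : pvRow t s 0 = "" := by
      simp [pvRow, PySem.Str.join, PySem.Chars.join, List.intercalate]
    rw [h0]
    simp
  | succ i ih =>
    intro s hs lin
    have hstep : PySem.List.pyRange 0 ((i : Int) + 1) 1 = PySem.List.pyRange 0 (i : Int) 1 ++ [(i : Int)] :=
      PySem.List.pyRange_one_succ_right (by positivity)
    rw [show ((i + 1 : Nat) : Int) = (i : Int) + 1 by push_cast; ring, hstep, List.foldl_append,
      ih s hs lin]
    simp only [List.foldl_cons, List.foldl_nil]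
    by_cases h : s + i < t.length
    · have hc : ((min (s + i) t.length : Nat) : Int) < (t.length : Int) := by
        push_cast; omega
      rw [if_pos hc, pvRow_succ_in t s i h]
      have hmin : min (s + i) t.length = s + i := by omega
      rw [Prod.mk.injEq]
      refine ⟨by push_cast; omega, ?_⟩
      rw [hmin]
      push_cast
      simp [pvCell, String.append_assoc]
    · have hc : ¬ ((min (s + i) t.length : Nat) : Int) < (t.length : Int) := by
        push_cast; omega
      rw [if_neg hc, pvRow_succ_out t s i (by omega)]
      rw [Prod.mk.injEq]
      exact ⟨by push_cast; omega, rfl⟩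

theorem pvSym_def : (PySem.Dict.empty.insert (0 : Int) "○").insert 1 "◉" = pvSym := rfl

-- dropping from min (T, len) is the same as dropping from T
theorem pvRow_min (t : List Int) (T i : Nat) :
    pvRow t (min T t.length) i = pvRow t T i := by
  unfold pvRow
  rcases le_total T t.length with h | h
  · rw [min_eq_left h]
  · rw [min_eq_right h, List.drop_eq_nil_of_le h, List.drop_eq_nil_of_le (by omega)]

-- ===== VERDICT (by name: the statement is the Claim_ definition above) =====
theorem tablero_a_texto_spec : Claim_equal_tablero_a_texto := by
  intro t _
  unfold Spec_tablero_a_texto tablero_a_texto tablero_a_texto_alt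
  have hR : PySem.List.pyRange 1 6 1 = [1, 2, 3, 4, 5] := by decide
  have hR' : PySem.List.pyRange 1 (5 + 1) 1 = [1, 2, 3, 4, 5] := by decide
  simp only [hR, hR', List.foldl_cons, List.foldl_nil, List.map_cons, List.map_nil, pvSym_def]
  have sl : ∀ (a b : Int) (s i : Nat), a = (s : Int) → b = (s : Int) + (i : Int) →
      PySem.List.slice t (some a) (some b) = (t.drop s).take i := by
    rintro a b s i rfl rfl
    exact PySem.List.slice_natCast_add t s i
  rw [sl _ _ 0 1 (by decide) (by decide), sl _ _ 1 2 (by decide) (by decide),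
    sl _ _ 3 3 (by decide) (by decide), sl _ _ 6 4 (by decide) (by decide),
    sl _ _ 10 5 (by decide) (by decide)]
  have hC : (fun c : Int => pvSym.getD c " " ++ "   ") = pvCell := rfl
  rw [hC]
  have h1 : ∀ lin, (PySem.List.pyRange 0 1 1).foldl
      (fun (p : Int × String) _ =>
        if p.1 < (t.length : Int) then
          (p.1 + 1, p.2 ++ pvSym.getD (PySem.List.pyGetD t p.1 0) " " ++ "   ")
        else p) (0, lin)
      = (((min 1 t.length : Nat) : Int), lin ++ pvRow t 0 1) := by
    intro lin
    have := pv_innerA t 1 0 (Nat.zero_le _) lin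
    norm_num at this ⊢
    exact this
  rw [h1]
  dsimp only
  have h2 : ∀ lin, (PySem.List.pyRange 0 2 1).foldl
      (fun (p : Int × String) _ =>
        if p.1 < (t.length : Int) then
          (p.1 + 1, p.2 ++ pvSym.getD (PySem.List.pyGetD t p.1 0) " " ++ "   ")
        else p) (((min 1 t.length : Nat) : Int), lin)
      = (((min 3 t.length : Nat) : Int), lin ++ pvRow t 1 2) := by
    intro lin
    have := pv_innerA t 2 (min 1 t.length) (min_le_right _ _) lin
    rw [pvRow_min t 1 2, show min (min 1 t.length + 2) t.length = min 3 t.length by omega] at this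
    norm_num at this ⊢
    exact this
  rw [h2]
  dsimp only
  have h3 : ∀ lin, (PySem.List.pyRange 0 3 1).foldl
      (fun (p : Int × String) _ =>
        if p.1 < (t.length : Int) then
          (p.1 + 1, p.2 ++ pvSym.getD (PySem.List.pyGetD t p.1 0) " " ++ "   ")
        else p) (((min 3 t.length : Nat) : Int), lin)
      = (((min 6 t.length : Nat) : Int), lin ++ pvRow t 3 3) := by
    intro lin
    have := pv_innerA t 3 (min 3 t.length) (min_le_right _ _) lin
    rw [pvRow_min t 3 3, show min (min 3 t.length + 3) t.length = min 6 t.length by omega] at this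
    norm_num at this ⊢
    exact this
  rw [h3]
  dsimp only
  have h4 : ∀ lin, (PySem.List.pyRange 0 4 1).foldl
      (fun (p : Int × String) _ =>
        if p.1 < (t.length : Int) then
          (p.1 + 1, p.2 ++ pvSym.getD (PySem.List.pyGetD t p.1 0) " " ++ "   ")
        else p) (((min 6 t.length : Nat) : Int), lin)
      = (((min 10 t.length : Nat) : Int), lin ++ pvRow t 6 4) := by
    intro lin
    have := pv_innerA t 4 (min 6 t.length) (min_le_right _ _) lin
    rw [pvRow_min t 6 4, show min (min 6 t.length + 4) t.length = min 10 t.length by omega] at this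
    norm_num at this ⊢
    exact this
  rw [h4]
  dsimp only
  have h5 : ∀ lin, (PySem.List.pyRange 0 5 1).foldl
      (fun (p : Int × String) _ =>
        if p.1 < (t.length : Int) then
          (p.1 + 1, p.2 ++ pvSym.getD (PySem.List.pyGetD t p.1 0) " " ++ "   ")
        else p) (((min 10 t.length : Nat) : Int), lin)
      = (((min 15 t.length : Nat) : Int), lin ++ pvRow t 10 5) := by
    intro lin
    have := pv_innerA t 5 (min 10 t.length) (min_le_right _ _) lin
    rw [pvRow_min t 10 5, show min (min 10 t.length + 5) t.length = min 15 t.length by omega] at this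
    norm_num at this ⊢
    exact this
  rw [h5]
  dsimp only
  simp only [pvRow, List.nil_append]
  rfl
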